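-- pv_equiv track=rewrite | github.com/deterherligt/valg | valg/scenarios/kv2025_transform.py | bucket_aos
-- ===== SOURCE A (Python) =====
-- def bucket_aos(
--     aos: list[dict],
--     thresholds: list[int],
-- ) -> list[list[dict]]:
--     """
--     Sort AOs by eligible_voters ascending, split into buckets at voter-count thresholds.
--     Empty buckets are omitted.
--
--     thresholds: e.g. [500, 1000, 1500, ...] defines N+1 buckets.
--     """
--     sorted_aos = sorted(aos, key=lambda a: a.get("eligible_voters", 0))
--     buckets: list[list[dict]] = []
--     prev = 0
--     for threshold in thresholds:
--         bucket = [a for a in sorted_aos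
--                   if prev <= a.get("eligible_voters", 0) < threshold]
--         if bucket:
--             buckets.append(bucket)
--         prev = threshold
--     # Final bucket: >= last threshold
--     final = [a for a in sorted_aos if a.get("eligible_voters", 0) >= prev]
--     if final:
--         buckets.append(final)
--     return buckets
-- ===== SOURCE B (Python) =====
-- def _bisect_left(keys, x):
--     # textbook bisect_left (A imports nothing, so no bisect module)
--     lo, hi = 0, len(keys)
--     while lo < hi:
--         mid = (lo + hi) // 2
--         if keys[mid] < x:
--             lo = mid + 1
--         else:
--             hi = mid
--     return lo
--
--
-- def bucket_aos(
--     aos: list[dict],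
--     thresholds: list[int],
-- ) -> list[list[dict]]:
--     """Sort once, build the (lo, hi) interval list up front, cut out every bucket as a
--     contiguous slice located by binary search, then drop the empty ones in one pass."""
--     s = sorted(aos, key=lambda a: a.get("eligible_voters", 0))
--     keys = [a.get("eligible_voters", 0) for a in s]
--     bounds = [0] + thresholds
--     segments = [s[_bisect_left(keys, lo):_bisect_left(keys, hi)]
--                 for lo, hi in zip(bounds, thresholds)]
--     segments.append(s[_bisect_left(keys, bounds[-1]):])
--     return [seg for seg in segments if seg]
-- ===== Notes on version B (the rewrite author's own statement) =====
-- stated objective: alternative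
-- what changed: Instead of A's stateful loop that re-filters the whole sorted list for every threshold, B builds the (lo,hi) interval list up front, cuts each bucket out as a contiguous slice of the once-sorted list located by binary search, and drops empty segments in a final pass.
import Mathlib
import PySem

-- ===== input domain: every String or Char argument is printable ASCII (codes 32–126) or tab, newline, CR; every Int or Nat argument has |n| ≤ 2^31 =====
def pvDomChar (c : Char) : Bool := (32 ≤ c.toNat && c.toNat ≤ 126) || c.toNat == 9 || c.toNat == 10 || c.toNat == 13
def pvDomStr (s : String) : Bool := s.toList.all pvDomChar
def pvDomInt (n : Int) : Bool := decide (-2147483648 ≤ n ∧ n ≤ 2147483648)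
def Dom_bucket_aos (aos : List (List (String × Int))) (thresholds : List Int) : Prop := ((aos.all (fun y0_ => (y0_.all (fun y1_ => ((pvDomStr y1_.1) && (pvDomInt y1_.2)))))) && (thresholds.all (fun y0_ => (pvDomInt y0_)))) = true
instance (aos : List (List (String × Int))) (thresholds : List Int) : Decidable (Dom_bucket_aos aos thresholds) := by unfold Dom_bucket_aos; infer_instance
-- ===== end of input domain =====

-- B builds the (lo,hi) interval list up front, cuts each bucket out as a contiguous slice of the
-- once-sorted list located by binary search, and drops empty segments in a final pass, instead of
-- A's stateful loop re-filtering the whole sorted list per threshold (objective: alternative).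

-- shared key extraction: Python's a.get("eligible_voters", 0)
def pvKey (a : List (String × Int)) : Int := PySem.Dict.getD ⟨a⟩ "eligible_voters" 0

-- ===== PORT A =====
def bucket_aos (aos : List (List (String × Int))) (thresholds : List Int) : List (List (List (String × Int))) :=
  let sorted_aos := PySem.List.sorted aos (fun a => pvKey a)
  let st := thresholds.foldl
    (fun (st : List (List (List (String × Int))) × Int) threshold =>
      let bucket := sorted_aos.filter (fun a => decide (st.2 ≤ pvKey a) && decide (pvKey a < threshold))
      (if bucket ≠ [] then st.1 ++ [bucket] else st.1, threshold))
    ([], 0)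
  let final := sorted_aos.filter (fun a => decide (st.2 ≤ pvKey a))
  if final ≠ [] then st.1 ++ [final] else st.1

-- ===== PORT B =====
-- Source B's hand-written _bisect_left is the textbook bisect_left loop; it is ported as the
-- prelude's PySem.List.bisectLeft, which is that same binary-search loop.
def bucket_aos_alt (aos : List (List (String × Int))) (thresholds : List Int) : List (List (List (String × Int))) :=
  let s := PySem.List.sorted aos (fun a => pvKey a)
  let keys := s.map (fun a => pvKey a)
  let bounds := 0 :: thresholds
  let segments := (bounds.zip thresholds).map (fun lh =>
    PySem.List.slice s (some ((PySem.List.bisectLeft keys lh.1 : Nat) : Int))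
                       (some ((PySem.List.bisectLeft keys lh.2 : Nat) : Int)))
  let segments := segments ++
    [PySem.List.slice s (some ((PySem.List.bisectLeft keys (bounds.getLastD 0) : Nat) : Int)) none]
  segments.filter (fun seg => !seg.isEmpty)

-- ===== PRECONDITION & SPEC =====
def Spec_bucket_aos (aos : List (List (String × Int))) (thresholds : List Int) (out : List (List (List (String × Int)))) : Prop := out = bucket_aos_alt aos thresholds
instance (aos : List (List (String × Int))) (thresholds : List Int) (out : List (List (List (String × Int)))) : Decidable (Spec_bucket_aos aos thresholds out) := by unfold Spec_bucket_aos; infer_instance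

-- ===== CLAIM (what is proved, stated in full; the proofs are below) =====
def Claim_equal_bucket_aos : Prop := ∀ (aos : List (List (String × Int))) (thresholds : List Int), Dom_bucket_aos aos thresholds → Spec_bucket_aos aos thresholds (bucket_aos aos thresholds)

-- ===== LEMMAS AND PROOFS =====

-- countP of a list whose boundary index m is characterised pointwise is m
theorem pv_countP_eq_of_bounded {p : Int → Bool} (l : List Int) (m : Nat)
    (hm : m ≤ l.length)
    (h1 : ∀ j (hj : j < l.length), j < m → p l[j])
    (h2 : ∀ j (hj : j < l.length), m ≤ j → ¬ p l[j]) :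
    l.countP p = m := by
  have hsplit : l = l.take m ++ l.drop m := (List.take_append_drop m l).symm
  have ht : (l.take m).countP p = m := by
    have : ∀ a ∈ l.take m, p a := by
      intro a ha
      obtain ⟨j, hj, rfl⟩ := List.mem_iff_getElem.mp ha
      have hjm : j < m := lt_of_lt_of_le hj (by simp [List.length_take])
      have hjl : j < l.length := lt_of_lt_of_le hjm hm
      have := h1 j hjl hjm
      simpa [List.getElem_take] using this
    rw [List.countP_eq_length.mpr this]
    simp [List.length_take, Nat.min_eq_left hm]
  have hd : (l.drop m).countP p = 0 := by
    apply List.countP_eq_zero.mpr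
    intro a ha
    obtain ⟨j, hj, rfl⟩ := List.mem_iff_getElem.mp ha
    have hjl : m + j < l.length := by
      have := hj; simp [List.length_drop] at this; omega
    have := h2 (m + j) hjl (Nat.le_add_right m j)
    simpa [List.getElem_drop] using this
  conv_lhs => rw [hsplit]
  rw [List.countP_append, ht, hd]; omega

-- on a key-sorted list, bisectLeft over the keys counts the elements with key < x
theorem pv_bl_eq_countP {α : Type} (k : α → Int) (s : List α)
    (hs : ((s.map k).Pairwise (· ≤ ·)))
    (x : Int) :
    PySem.List.bisectLeft (s.map k) x = s.countP (fun a => decide (k a < x)) := by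
  obtain ⟨hle, h1, h2⟩ := PySem.List.bisectLeft_spec (s.map k) x hs
  have := pv_countP_eq_of_bounded (p := fun v => decide (v < x)) (s.map k)
      (PySem.List.bisectLeft (s.map k) x) (by simpa using hle)
      (by intro j hj hjm; simpa using h1 j hj hjm)
      (by intro j hj hjm; have := h2 j hj hjm
          simp only [List.getElem_map] at this ⊢; simpa using this)
  rw [← this, List.countP_map]
  rfl

-- if every key of s is ≥ k a and ¬ k a < x, no key of s is < x
theorem pv_countP_lt_zero {α : Type} (k : α → Int) (s : List α) (a : α) (x : Int)
    (ha : ∀ b ∈ s, k a ≤ k b) (hax : ¬ k a < x) :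
    s.countP (fun b => decide (k b < x)) = 0 := by
  apply List.countP_eq_zero.mpr
  intro b hb
  have := ha b hb
  simp only [decide_eq_true_eq]
  omega

-- on a key-sorted list, the filter for a half-open key range is a contiguous drop/take
theorem pv_filter_range {α : Type} (k : α → Int) :
    ∀ (s : List α), ((s.map k).Pairwise (· ≤ ·)) → ∀ (p t : Int),
    s.filter (fun a => decide (p ≤ k a) && decide (k a < t)) =
      (s.drop (s.countP (fun a => decide (k a < p)))).take
        (s.countP (fun a => decide (k a < t)) - s.countP (fun a => decide (k a < p))) := by
  intro s
  induction s with
  | nil => intro _ p t; simp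
  | cons a rest ih =>
    intro hs p t
    rw [List.map_cons, List.pairwise_cons] at hs
    obtain ⟨ha, hrest⟩ := hs
    have ha' : ∀ b ∈ rest, k a ≤ k b := by
      intro b hb; exact ha (k b) (List.mem_map_of_mem hb)
    have IH := ih hrest p t
    by_cases hp : k a < p
    · by_cases htc : k a < t
      · simp only [List.filter_cons, List.countP_cons, hp, htc, decide_true]
        have : ¬ (p ≤ k a) := by omega
        simp [this, IH]
      · have h0 : rest.countP (fun b => decide (k b < t)) = 0 := pv_countP_lt_zero k rest a t ha' htc
        have hall : (a :: rest).filter (fun x => decide (p ≤ k x) && decide (k x < t)) = [] := by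
          apply List.filter_eq_nil_iff.mpr
          intro b hb
          rcases List.mem_cons.mp hb with rfl | hb'
          · simp [htc]
          · have := ha' b hb'; simp only [Bool.and_eq_true, decide_eq_true_eq, not_and]; omega
        rw [hall]
        simp [List.countP_cons, htc, h0]
    · have h0 : rest.countP (fun b => decide (k b < p)) = 0 := pv_countP_lt_zero k rest a p ha' hp
      by_cases htc : k a < t
      · simp only [List.filter_cons, List.countP_cons, hp, htc]
        have hple : p ≤ k a := by omega
        simp only [hple, decide_true, decide_false, Bool.true_and]
        rw [IH, h0]
        simp
      · have h0t : rest.countP (fun b => decide (k b < t)) = 0 := pv_countP_lt_zero k rest a t ha' htc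
        have hall : (a :: rest).filter (fun x => decide (p ≤ k x) && decide (k x < t)) = [] := by
          apply List.filter_eq_nil_iff.mpr
          intro b hb
          rcases List.mem_cons.mp hb with rfl | hb'
          · simp [htc]
          · have := ha' b hb'; simp only [Bool.and_eq_true, decide_eq_true_eq, not_and]; omega
        rw [hall]
        simp [htc, h0t]

-- on a key-sorted list, the filter for keys ≥ p is a drop
theorem pv_filter_ge {α : Type} (k : α → Int) :
    ∀ (s : List α), ((s.map k).Pairwise (· ≤ ·)) → ∀ (p : Int),
    s.filter (fun a => decide (p ≤ k a)) = s.drop (s.countP (fun a => decide (k a < p))) := by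
  intro s
  induction s with
  | nil => intro _ p; simp
  | cons a rest ih =>
    intro hs p
    rw [List.map_cons, List.pairwise_cons] at hs
    obtain ⟨ha, hrest⟩ := hs
    have ha' : ∀ b ∈ rest, k a ≤ k b := by
      intro b hb; exact ha (k b) (List.mem_map_of_mem hb)
    by_cases hp : k a < p
    · have hnp : ¬ (p ≤ k a) := by omega
      simp [hp, hnp, ih hrest p]
    · have h0 : rest.countP (fun b => decide (k b < p)) = 0 := pv_countP_lt_zero k rest a p ha' hp
      have hple : p ≤ k a := by omega
      simp [hp, hple, ih hrest p, h0]

-- A's per-threshold filter equals B's slice between the two bisect positions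
theorem pv_bucket_eq (s : List (List (String × Int)))
    (hs : ((s.map pvKey).Pairwise (· ≤ ·))) (p t : Int) :
    s.filter (fun a => decide (p ≤ pvKey a) && decide (pvKey a < t)) =
      PySem.List.slice s (some ((PySem.List.bisectLeft (s.map (fun a => pvKey a)) p : Nat) : Int))
                         (some ((PySem.List.bisectLeft (s.map (fun a => pvKey a)) t : Nat) : Int)) := by
  rw [PySem.List.slice_natCast, pv_bl_eq_countP pvKey s hs p, pv_bl_eq_countP pvKey s hs t]
  exact pv_filter_range pvKey s hs p t

-- A's final filter equals B's tail slice
theorem pv_final_eq (s : List (List (String × Int)))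
    (hs : ((s.map pvKey).Pairwise (· ≤ ·))) (p : Int) :
    s.filter (fun a => decide (p ≤ pvKey a)) =
      PySem.List.slice s (some ((PySem.List.bisectLeft (s.map (fun a => pvKey a)) p : Nat) : Int)) none := by
  rw [PySem.List.slice_from_natCast, pv_bl_eq_countP pvKey s hs p]
  exact pv_filter_ge pvKey s hs p

-- A's threshold fold, characterised: accumulated buckets = the nonempty range filters for the
-- interval list zip (p::ths) ths, and the carried prev = the last bound
theorem pv_fold_char (s : List (List (String × Int))) :
    ∀ (ths : List Int) (acc : List (List (List (String × Int)))) (p : Int),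
    ths.foldl
      (fun (st : List (List (List (String × Int))) × Int) threshold =>
        let bucket := s.filter (fun a => decide (st.2 ≤ pvKey a) && decide (pvKey a < threshold))
        (if bucket ≠ [] then st.1 ++ [bucket] else st.1, threshold)) (acc, p) =
    (acc ++ (((p :: ths).zip ths).map (fun lh =>
        s.filter (fun a => decide (lh.1 ≤ pvKey a) && decide (pvKey a < lh.2)))).filter
        (fun seg => !seg.isEmpty),
     (p :: ths).getLastD 0) := by
  intro ths
  induction ths with
  | nil => intro acc p; simp
  | cons t rest ih =>
    intro acc p
    simp only [List.foldl_cons, List.zip_cons_cons, List.map_cons, List.filter_cons]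
    rw [ih]
    set b := s.filter (fun a => decide (p ≤ pvKey a) && decide (pvKey a < t)) with hb
    simp only [Prod.mk.injEq]
    refine ⟨?_, ?_⟩
    · by_cases hbe : b = []
      · simp [hbe]
      · have : (!b.isEmpty) = true := by simp [hbe]
        simp [hbe, this]
    · cases rest <;> simp [List.getLastD]

-- ===== VERDICT (by name: the statement is the Claim_ definition above) =====
theorem bucket_aos_spec : Claim_equal_bucket_aos := by
  intro aos thresholds _
  show bucket_aos aos thresholds = bucket_aos_alt aos thresholds
  unfold bucket_aos bucket_aos_alt
  have hs := PySem.List.sorted_map_key_pairwise aos (fun a => pvKey a)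
  set s := PySem.List.sorted aos (fun a => pvKey a) with hsdef
  simp only []
  rw [pv_fold_char s thresholds [] 0]
  have hbkt : (fun (lh : Int × Int) =>
      s.filter (fun a => decide (lh.1 ≤ pvKey a) && decide (pvKey a < lh.2))) =
      (fun lh => PySem.List.slice s
        (some ((PySem.List.bisectLeft (s.map (fun a => pvKey a)) lh.1 : Nat) : Int))
        (some ((PySem.List.bisectLeft (s.map (fun a => pvKey a)) lh.2 : Nat) : Int))) := by
    funext lh; exact pv_bucket_eq s hs lh.1 lh.2
  rw [hbkt, pv_final_eq s hs]
  set L := (((0 :: thresholds).zip thresholds).map (fun lh => PySem.List.slice s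
        (some ((PySem.List.bisectLeft (s.map (fun a => pvKey a)) lh.1 : Nat) : Int))
        (some ((PySem.List.bisectLeft (s.map (fun a => pvKey a)) lh.2 : Nat) : Int)))) with hL
  set fin := PySem.List.slice s
      (some ((PySem.List.bisectLeft (s.map (fun a => pvKey a)) ((0 :: thresholds).getLastD 0) : Nat) : Int)) none with hfin
  rw [List.filter_append]
  by_cases hfe : fin = []
  · simp [hfe]
  · have : (!fin.isEmpty) = true := by simp [hfe]
    simp [hfe, this]
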